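-- pv_equiv track=rewrite | github.com/shubhamoli/practice | leetcode/easy/1185-Day_of_week.py | dayOfTheWeek_2
-- ===== SOURCE A (Python) =====
-- def dayOfTheWeek_2(day: int, month: int, year: int) -> str:
--     # today of 6th june day is saturday
--     # so starting days from Saturday
--     days = ["Saturday", "Sunday", "Monday", "Tuesday", "Wednesday", "Thursday", "Friday"]
--     months = [31, 28, 31, 30, 31, 30, 31, 31, 30, 31, 30, 31]
--
--     def isLeapYear(year):
--         return 1 if year % 4 == 0 and year % 100 != 0 or year % 400 == 0 else 0
--
--     def getDay(day, month, year):
--         numDays = 0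
--         # get num days till last year
--         for y in range(year-1, 1970, -1):
--             numDays += 365 + isLeapYear(y)
--
--         numDays += sum(months[:month-1])
--         numDays += day
--
--         if month > 2:
--             numDays += isLeapYear(year)
--
--         return numDays
--
--     k = getDay(6, 6, 2020) # today is saturday
--     d = getDay(day, month, year)
--
--     return days[(d-k)%7]
-- ===== SOURCE B (Python) =====
-- def dayOfTheWeek_2(day: int, month: int, year: int) -> str:
--     # Day count from the 1971 epoch (dates before it contribute no years),
--     # leap years in closed form; day number 18055 (2020-06-06) was a Saturday.
--     days = ["Saturday", "Sunday", "Monday", "Tuesday", "Wednesday", "Thursday", "Friday"]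
--     months = [31, 28, 31, 30, 31, 30, 31, 31, 30, 31, 30, 31]
--
--     def leaps(y):
--         return y // 4 - y // 100 + y // 400
--
--     y = max(year, 1971)
--     d = 365 * (y - 1971) + leaps(y - 1) - leaps(1970) + sum(months[:month - 1]) + day
--     if month > 2 and (year % 4 == 0 and year % 100 != 0 or year % 400 == 0):
--         d += 1
--     return days[(d - 18055) % 7]
-- ===== Notes on version B (the rewrite author's own statement) =====
-- stated objective: faster
-- what changed: Replaces A's O(year) per-year loop with the closed-form cumulative leap count y//4 - y//100 + y//400 over years since the 1971 epoch (years before the epoch contribute nothing, as in A's anchor design) and a precomputed anchor day number 18055 for 2020-06-06.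
import Mathlib
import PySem

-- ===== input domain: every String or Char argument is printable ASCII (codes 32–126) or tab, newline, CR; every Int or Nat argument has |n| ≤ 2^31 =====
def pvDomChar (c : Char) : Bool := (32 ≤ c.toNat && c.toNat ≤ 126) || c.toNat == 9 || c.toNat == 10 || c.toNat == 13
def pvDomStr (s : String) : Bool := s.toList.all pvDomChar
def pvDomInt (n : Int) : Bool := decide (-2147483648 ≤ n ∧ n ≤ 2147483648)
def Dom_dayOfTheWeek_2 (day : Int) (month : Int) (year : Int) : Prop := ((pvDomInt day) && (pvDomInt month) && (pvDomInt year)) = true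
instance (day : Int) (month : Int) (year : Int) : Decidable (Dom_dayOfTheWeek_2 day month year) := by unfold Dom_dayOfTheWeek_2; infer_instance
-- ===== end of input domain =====

-- B replaces A's O(year) per-year loop by the closed-form cumulative leap count
-- y//4 - y//100 + y//400 over years since the 1971 epoch and a precomputed anchor
-- day number; objective: faster.

-- ===== PORT A =====
def pvIsLeapA (y : Int) : Int :=
  if (PySem.Int.mod y 4 = 0 ∧ PySem.Int.mod y 100 ≠ 0) ∨ PySem.Int.mod y 400 = 0 then 1 else 0

def pvMonthsA : List Int := [31, 28, 31, 30, 31, 30, 31, 31, 30, 31, 30, 31]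

def pvGetDayA (day : Int) (month : Int) (year : Int) : Int :=
  let numDays : Int := 0
  let numDays := (PySem.List.pyRange (year - 1) 1970 (-1)).foldl
    (fun acc y => acc + (365 + pvIsLeapA y)) numDays
  let numDays := numDays + (PySem.List.slice pvMonthsA none (some (month - 1))).sum
  let numDays := numDays + day
  if month > 2 then numDays + pvIsLeapA year else numDays

def dayOfTheWeek_2 (day : Int) (month : Int) (year : Int) : String :=
  let days : List String := ["Saturday", "Sunday", "Monday", "Tuesday", "Wednesday", "Thursday", "Friday"]
  let k := pvGetDayA 6 6 2020
  let d := pvGetDayA day month year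
  PySem.List.pyGetD days (PySem.Int.mod (d - k) 7) ""

-- ===== PORT B =====
def pvMonthsB : List Int := [31, 28, 31, 30, 31, 30, 31, 31, 30, 31, 30, 31]

def pvLeapsB (y : Int) : Int :=
  PySem.Int.floordiv y 4 - PySem.Int.floordiv y 100 + PySem.Int.floordiv y 400

def dayOfTheWeek_2_alt (day : Int) (month : Int) (year : Int) : String :=
  let days : List String := ["Saturday", "Sunday", "Monday", "Tuesday", "Wednesday", "Thursday", "Friday"]
  let y := max year 1971
  let d := 365 * (y - 1971) + pvLeapsB (y - 1) - pvLeapsB 1970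
             + (PySem.List.slice pvMonthsB none (some (month - 1))).sum + day
  let d := if month > 2 ∧ ((PySem.Int.mod year 4 = 0 ∧ PySem.Int.mod year 100 ≠ 0) ∨ PySem.Int.mod year 400 = 0)
           then d + 1 else d
  PySem.List.pyGetD days (PySem.Int.mod (d - 18055) 7) ""

-- ===== PRECONDITION & SPEC =====
def Spec_dayOfTheWeek_2 (day : Int) (month : Int) (year : Int) (out : String) : Prop := out = dayOfTheWeek_2_alt day month year
instance (day : Int) (month : Int) (year : Int) (out : String) : Decidable (Spec_dayOfTheWeek_2 day month year out) := by unfold Spec_dayOfTheWeek_2; infer_instance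

-- ===== CLAIM =====
def Claim_equal_dayOfTheWeek_2 : Prop := ∀ (day : Int) (month : Int) (year : Int), Dom_dayOfTheWeek_2 day month year → Spec_dayOfTheWeek_2 day month year (dayOfTheWeek_2 day month year)

-- ===== LEMMAS AND PROOFS =====

-- the yearly leap indicator is the step of the cumulative leap count
theorem leap_step (a : Int) : pvIsLeapA a = pvLeapsB a - pvLeapsB (a - 1) := by
  unfold pvIsLeapA pvLeapsB
  rw [PySem.Int.mod_eq_emod_of_pos (b := 4) (by norm_num),
      PySem.Int.mod_eq_emod_of_pos (b := 100) (by norm_num),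
      PySem.Int.mod_eq_emod_of_pos (b := 400) (by norm_num),
      PySem.Int.floordiv_eq_ediv_of_pos (b := 4) (by norm_num),
      PySem.Int.floordiv_eq_ediv_of_pos (b := 100) (by norm_num),
      PySem.Int.floordiv_eq_ediv_of_pos (b := 400) (by norm_num),
      PySem.Int.floordiv_eq_ediv_of_pos (b := 4) (by norm_num),
      PySem.Int.floordiv_eq_ediv_of_pos (b := 100) (by norm_num),
      PySem.Int.floordiv_eq_ediv_of_pos (b := 400) (by norm_num)]
  split_ifs with h <;> omega

theorem loopA (n : Nat) : ∀ (a : Int), a - 1970 ≤ n → ∀ init : Int,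
    (PySem.List.pyRange a 1970 (-1)).foldl (fun acc y => acc + (365 + pvIsLeapA y)) init
      = init + (if 1970 < a then 365 * (a - 1970) + pvLeapsB a - pvLeapsB 1970 else 0) := by
  induction n with
  | zero =>
    intro a ha init
    rw [PySem.List.pyRange_neg_one_eq_nil (by omega), if_neg (by omega)]
    simp
  | succ n ih =>
    intro a ha init
    by_cases h : 1970 < a
    · rw [PySem.List.pyRange_neg_one_cons (by omega)]
      simp only [List.foldl_cons]
      rw [ih (a - 1) (by omega)]
      have hs := leap_step a
      by_cases h2 : 1970 < a - 1
      · rw [if_pos h2, if_pos h]; omega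
      · have ha' : a = 1971 := by omega
        subst ha'
        rw [if_neg h2, if_pos h]
        norm_num at hs ⊢
        have h1 : pvLeapsB 1971 = pvLeapsB 1970 := by decide
        have h3 : pvIsLeapA 1971 = 0 := by decide
        omega
    · rw [PySem.List.pyRange_neg_one_eq_nil (by omega), if_neg h]
      simp

theorem getDay_eq (day month year : Int) :
    pvGetDayA day month year
      = (let y := max year 1971
         let d := 365 * (y - 1971) + pvLeapsB (y - 1) - pvLeapsB 1970
               + (PySem.List.slice pvMonthsB none (some (month - 1))).sum + day
         if month > 2 ∧ ((PySem.Int.mod year 4 = 0 ∧ PySem.Int.mod year 100 ≠ 0) ∨ PySem.Int.mod year 400 = 0)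
         then d + 1 else d) := by
  have hloop := loopA (year - 1 - 1970).toNat (year - 1) (by omega) 0
  simp only [pvGetDayA, hloop]
  have hM : pvMonthsA = pvMonthsB := rfl
  rw [hM]
  set S := (PySem.List.slice pvMonthsB none (some (month - 1))).sum with hS
  unfold pvIsLeapA
  by_cases hy : 1970 < year - 1
  · have hmax : max year 1971 = year := by omega
    rw [if_pos hy, hmax]
    split_ifs <;> simp_all <;> omega
  · have hmax : max year 1971 = 1971 := by omega
    rw [if_neg hy, hmax]
    have h1971 : pvLeapsB 1971 - pvLeapsB 1970 = 0 := by decide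
    split_ifs <;> simp_all

theorem main_eq (day month year : Int) :
    dayOfTheWeek_2 day month year = dayOfTheWeek_2_alt day month year := by
  unfold dayOfTheWeek_2 dayOfTheWeek_2_alt
  have hk : pvGetDayA 6 6 2020 = 18055 := by
    rw [getDay_eq 6 6 2020]; decide
  simp only [hk, getDay_eq day month year]

-- ===== VERDICT =====
theorem dayOfTheWeek_2_spec : Claim_equal_dayOfTheWeek_2 := by
  intro day month year _
  unfold Spec_dayOfTheWeek_2
  exact main_eq day month year
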